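-- pv_equiv track=rewrite | github.com/sallyyinzhang/pythongame | connect4/connect4.py | row_win
-- ===== SOURCE A (Python) =====
-- def row_win(board):
--   """
--   check if there is a win in a row
--   @board: a list of lists of characters.
--   @returns: true if there is a row win and false otherwise
--   """
--   for row in board: #for each row in the board
--       for i in range(len(row)-3):
--           if row[i] != "*":
--              if (row[i] == row[i+1]) and (row[i] == row[i+2]) and (row[i] == row[i+3]):
--                  return True
--   else:
--       return False
-- ===== SOURCE B (Python) =====
-- def row_win(board):
--     for row in board:
--         count = 0
--         prev = None
--         for c in row:
--             if c == "*":
--                 count = 0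
--             elif c == prev:
--                 count += 1
--             else:
--                 count = 1
--             if count >= 4:
--                 return True
--             prev = c
--     return False
-- ===== Notes on version B (the rewrite author's own statement) =====
-- stated objective: alternative
-- what changed: Replaced the fixed 4-cell window comparison at every index by a single-pass run-length state machine per row (running count of consecutive equal non-'*' cells, returning as soon as it reaches 4).
import Mathlib
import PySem

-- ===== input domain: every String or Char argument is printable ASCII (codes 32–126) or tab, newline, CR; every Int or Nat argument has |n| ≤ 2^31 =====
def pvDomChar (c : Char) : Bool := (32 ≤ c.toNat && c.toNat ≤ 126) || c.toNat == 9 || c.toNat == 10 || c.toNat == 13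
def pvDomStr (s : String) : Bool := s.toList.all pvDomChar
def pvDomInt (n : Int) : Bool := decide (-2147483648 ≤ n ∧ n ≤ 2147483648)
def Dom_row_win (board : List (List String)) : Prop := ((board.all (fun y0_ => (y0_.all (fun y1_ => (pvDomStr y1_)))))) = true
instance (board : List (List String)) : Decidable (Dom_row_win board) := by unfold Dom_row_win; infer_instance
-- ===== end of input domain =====

-- B replaces A's fixed 4-cell window comparison at every index by a single
-- left-to-right run-length state machine per row; same cost, different algorithm.

-- ===== PORT A =====
-- inner loop 'for i in range(len(row)-3): …' of A, as an any over the index range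
def rowCheckA (row : List String) : Bool :=
  (List.range (row.length - 3)).any (fun i =>
    decide (row.getD i "" ≠ "*") &&
    (row.getD i "" == row.getD (i+1) "" &&
     (row.getD i "" == row.getD (i+2) "" && row.getD i "" == row.getD (i+3) "")))

def row_win (board : List (List String)) : Bool :=
  match board with
  | [] => false
  | row :: rest => if rowCheckA row then true else row_win rest

-- ===== PORT B =====
-- inner loop of B: running count of consecutive equal non-'*' cells, prev = None initially
def goRowB (cs : List String) (count : Nat) (prev : Option String) : Bool :=
  match cs with
  | [] => false
  | c :: rest =>
    let count' := if c = "*" then 0 else if prev = some c then count + 1 else 1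
    if 4 ≤ count' then true else goRowB rest count' (some c)

def row_win_alt (board : List (List String)) : Bool :=
  match board with
  | [] => false
  | row :: rest => if goRowB row 0 none then true else row_win_alt rest

-- ===== PRECONDITION & SPEC =====
def Spec_row_win (board : List (List String)) (out : Bool) : Prop := out = row_win_alt board
instance (board : List (List String)) (out : Bool) : Decidable (Spec_row_win board out) := by unfold Spec_row_win; infer_instance

-- ===== CLAIM (what is proved, stated in full; the proofs are below) =====
def Claim_equal_row_win : Prop := ∀ (board : List (List String)), Dom_row_win board → Spec_row_win board (row_win board)

-- ===== LEMMAS AND PROOFS =====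

-- "row has four consecutive equal non-'*' cells starting at index i"
def HasWin (row : List String) : Prop :=
  ∃ i, i + 3 < row.length ∧ row.getD i "" ≠ "*" ∧
    row.getD i "" = row.getD (i+1) "" ∧ row.getD i "" = row.getD (i+2) "" ∧
    row.getD i "" = row.getD (i+3) ""

theorem rowCheckA_iff (row : List String) : rowCheckA row = true ↔ HasWin row := by
  unfold rowCheckA HasWin
  simp only [List.any_eq_true, List.mem_range, Bool.and_eq_true, decide_eq_true_eq,
    beq_iff_eq]
  constructor
  · rintro ⟨i, hi, h1, h2, h3, h4⟩
    exact ⟨i, by omega, h1, h2, h3, h4⟩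
  · rintro ⟨i, hi, h1, h2, h3, h4⟩
    exact ⟨i, by omega, h1, h2, h3, h4⟩

-- characterization of B's inner loop
theorem goRowB_iff (cs : List String) (count : Nat) (prev : Option String) :
    goRowB cs count prev = true ↔
      HasWin cs ∨ (∃ s, prev = some s ∧ s ≠ "*" ∧
        ∃ m, 1 ≤ m ∧ m ≤ cs.length ∧ 4 ≤ count + m ∧ ∀ j < m, cs.getD j "" = s) := by
  induction cs generalizing count prev with
  | nil =>
    simp only [goRowB]
    constructor
    · intro h; cases h
    · rintro (⟨i, hi, _⟩ | ⟨s, _, _, m, hm1, hm2, _⟩)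
      · simp at hi
      · simp at hm2; omega
  | cons c rest ih =>
    simp only [goRowB]
    set count' := if c = "*" then 0 else if prev = some c then count + 1 else 1 with hc'
    by_cases h4 : 4 ≤ count'
    · simp only [h4, if_pos, if_true]
      constructor
      · intro _
        -- count' ≥ 4 forces c ≠ "*", prev = some c and count ≥ 3
        by_cases hstar : c = "*"
        · simp [hstar] at hc'; omega
        · by_cases hp : prev = some c
          · refine Or.inr ⟨c, hp, hstar, 1, le_refl 1, by simp, ?_, ?_⟩
            · simp [hstar, hp] at hc'; omega
            · intro j hj; interval_cases j; simp
          · simp [hstar, hp] at hc'; omega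
      · intro _; trivial
    · simp only [if_neg h4, ih]
      constructor
      · rintro (hw | ⟨s, hs, hstar, m, hm1, hm2, hm4, hall⟩)
        · -- a window entirely inside rest shifts by one
          obtain ⟨i, hi, h1, h2, h3, hh4⟩ := hw
          exact Or.inl ⟨i + 1, by simp; omega, by simpa using h1, by simpa using h2,
            by simpa using h3, by simpa using hh4⟩
        · -- run of m copies of s = c at the front of rest
          have hsc : s = c := (Option.some.inj hs).symm
          rw [hsc] at hstar hall
          by_cases hstar' : c = "*"
          · exact absurd hstar' hstar
          by_cases hp : prev = some c
          · -- extend the boundary run by the head c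
            refine Or.inr ⟨c, hp, hstar, m + 1, by omega, by simp only [List.length_cons]; omega, ?_, ?_⟩
            · simp [hstar', hp] at hc'; omega
            · intro j hj
              cases j with
              | zero => simp
              | succ j => simpa using hall j (by omega)
          · -- fresh run: count' = 1, so m ≥ 3 and positions 0..3 of c::rest are all c
            have hcnt : count' = 1 := by simp [hstar', hp] at hc'; omega
            have hm3 : 3 ≤ m := by omega
            refine Or.inl ⟨0, by simp; omega, by simpa using hstar, ?_, ?_, ?_⟩
            · simpa using (hall 0 (by omega)).symm
            · simpa using (hall 1 (by omega)).symm
            · simpa using (hall 2 (by omega)).symm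
      · rintro (hw | ⟨s, hs, hstar, m, hm1, hm2, hm4, hall⟩)
        · obtain ⟨i, hi, h1, h2, h3, hh4⟩ := hw
          cases i with
          | succ i =>
            exact Or.inl ⟨i, by simp at hi; omega, by simpa using h1, by simpa using h2,
              by simpa using h3, by simpa using hh4⟩
          | zero =>
            -- window at the front: rest starts with three copies of c ≠ "*"
            have hc0 : (c :: rest).getD 0 "" = c := by simp
            rw [hc0] at h1 h2 h3 hh4
            have hstar' : c ≠ "*" := h1
            have hcnt : 1 ≤ count' := by
              by_cases hp : prev = some c <;> simp [hstar', hp] at hc' <;> omega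
            refine Or.inr ⟨c, rfl, hstar', 3, by omega, by simp at hi; omega, by omega, ?_⟩
            intro j hj
            interval_cases j
            · simpa using h2.symm
            · simpa using h3.symm
            · simpa using hh4.symm
        · -- boundary run of c::rest: head must be c = s
          have hsc : c = s := by simpa using hall 0 (by omega)
          subst hsc
          subst hs
          have hcnt : count' = count + 1 := by simp [hstar] at hc'; omega
          have hm2' : 2 ≤ m := by
            by_contra hlt
            have : m = 1 := by omega
            omega
          refine Or.inr ⟨c, rfl, hstar, m - 1, by omega, by simp at hm2; omega, by omega, ?_⟩
          intro j hj
          simpa using hall (j + 1) (by omega)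

theorem row_eq (row : List String) : rowCheckA row = goRowB row 0 none := by
  rw [Bool.eq_iff_iff, rowCheckA_iff, goRowB_iff]
  constructor
  · exact Or.inl
  · rintro (h | ⟨s, hs, _⟩)
    · exact h
    · cases hs

theorem row_win_eq (board : List (List String)) : row_win board = row_win_alt board := by
  induction board with
  | nil => rfl
  | cons row rest ih => simp only [row_win, row_win_alt, row_eq row, ih]

-- ===== VERDICT (by name: the statement is the Claim_ definition above) =====
theorem row_win_spec : Claim_equal_row_win := by
  intro board _
  exact row_win_eq board
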